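-- pv_equiv track=rewrite | github.com/RaggedR/university_courses | fix_latex.py | find_inline_math_spans
-- ===== SOURCE A (Python) =====
-- def find_inline_math_spans(line):
--     """Find all inline $...$ spans. Returns list of (start, end) tuples.
--     Skips $$ delimiters."""
--     spans = []
--     i = 0
--     n = len(line)
--     while i < n:
--         if line[i] == '$':
--             if i + 1 < n and line[i + 1] == '$':
--                 i += 2          # skip $$
--                 continue
--             # search for closing $
--             j = i + 1
--             while j < n:
--                 if line[j] == '\\' and j + 1 < n:
--                     j += 2      # skip escaped char
--                     continue
--                 if line[j] == '$':
--                     if j + 1 < n and line[j + 1] == '$':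
--                         j += 2  # skip $$
--                         continue
--                     spans.append((i, j + 1))
--                     i = j + 1
--                     break
--                 j += 1
--             else:
--                 i += 1          # no closing $
--         else:
--             i += 1
--     return spans
-- ===== SOURCE B (Python) =====
-- def find_inline_math_spans(line):
--     """Find all inline $...$ spans. Returns list of (start, end) tuples.
--     Skips $$ delimiters."""
--     spans = []
--     i = 0
--     n = len(line)
--     in_math = False
--     start = 0
--     while i < n:
--         if in_math:
--             if line[i] == '\\' and i + 1 < n:
--                 i += 2          # skip escaped char
--             elif line[i] == '$':
--                 if i + 1 < n and line[i + 1] == '$':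
--                     i += 2      # skip $$
--                 else:
--                     spans.append((start, i + 1))
--                     in_math = False
--                     i += 1
--             else:
--                 i += 1
--         else:
--             if line[i] == '$':
--                 if i + 1 < n and line[i + 1] == '$':
--                     i += 2      # skip $$
--                 else:
--                     start = i
--                     in_math = True
--                     i += 1
--             else:
--                 i += 1
--     return spans
-- ===== Notes on version B (the rewrite author's own statement) =====
-- stated objective: simpler
-- what changed: Replaced A's nested loops (outer scan plus an inner closing-search that on failure triggers an advance-one-and-rescan restart) with a single linear pass driven by an in_math/start state machine that never rescans.
import Mathlib
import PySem

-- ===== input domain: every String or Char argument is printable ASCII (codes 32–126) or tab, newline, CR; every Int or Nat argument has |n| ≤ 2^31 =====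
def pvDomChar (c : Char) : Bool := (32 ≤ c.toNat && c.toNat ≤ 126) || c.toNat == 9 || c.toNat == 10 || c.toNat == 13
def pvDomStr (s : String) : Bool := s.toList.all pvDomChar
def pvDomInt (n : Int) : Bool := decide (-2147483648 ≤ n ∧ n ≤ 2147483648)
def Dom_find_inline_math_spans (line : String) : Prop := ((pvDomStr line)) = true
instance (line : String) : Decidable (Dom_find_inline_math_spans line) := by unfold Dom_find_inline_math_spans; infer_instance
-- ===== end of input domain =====

-- B is a single linear state-machine pass (boolean in_math + recorded start) replacing A's
-- nested rescan loops; objective: simpler (same observable result, no restart scanning).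

-- ===== PORT A =====
-- inner while loop of A: search for the closing '$' starting at j; returns its index, or none
def pvInner (l : List Char) (j : Nat) : Option Nat :=
  if h : j < l.length then
    if l[j]?.getD ' ' = '\\' ∧ j + 1 < l.length then
      pvInner l (j + 2)
    else if l[j]?.getD ' ' = '$' then
      if j + 1 < l.length ∧ l[j + 1]?.getD ' ' = '$' then
        pvInner l (j + 2)
      else
        some j
    else
      pvInner l (j + 1)
  else
    none
termination_by l.length - j

-- the inner loop only moves forward: a termination fact A's outer loop needs
theorem pvInner_ge (l : List Char) (j : Nat) (k : Nat) (h : pvInner l j = some k) : j ≤ k := by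
  fun_induction pvInner l j with
  | case1 j hj h1 ih => exact le_trans (by omega) (ih h)
  | case2 j hj h1 h2 h3 ih => exact le_trans (by omega) (ih h)
  | case3 j hj h1 h2 h3 => simp_all
  | case4 j hj h1 h2 ih => exact le_trans (by omega) (ih h)
  | case5 j hj => simp_all

-- outer while loop of A
def pvOuter (l : List Char) (i : Nat) : List (Int × Int) :=
  if hi : i < l.length then
    if l[i]?.getD ' ' = '$' then
      if i + 1 < l.length ∧ l[i + 1]?.getD ' ' = '$' then
        pvOuter l (i + 2)
      else
        match h : pvInner l (i + 1) with
        | some j => ((i : Int), (j : Int) + 1) :: pvOuter l (j + 1)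
        | none => pvOuter l (i + 1)
    else
      pvOuter l (i + 1)
  else
    []
termination_by l.length - i
decreasing_by
  · omega
  · have := pvInner_ge l (i + 1) j h; omega
  · omega
  · omega

def find_inline_math_spans (line : String) : List (Int × Int) :=
  pvOuter line.toList 0

-- ===== PORT B =====
-- B's single while loop: one pass with state (in_math, start)
def pvScan (l : List Char) (i : Nat) (inMath : Bool) (start : Nat) : List (Int × Int) :=
  if h : i < l.length then
    if inMath then
      if l[i]?.getD ' ' = '\\' ∧ i + 1 < l.length then
        pvScan l (i + 2) true start
      else if l[i]?.getD ' ' = '$' then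
        if i + 1 < l.length ∧ l[i + 1]?.getD ' ' = '$' then
          pvScan l (i + 2) true start
        else
          ((start : Int), (i : Int) + 1) :: pvScan l (i + 1) false start
      else
        pvScan l (i + 1) true start
    else
      if l[i]?.getD ' ' = '$' then
        if i + 1 < l.length ∧ l[i + 1]?.getD ' ' = '$' then
          pvScan l (i + 2) false start
        else
          pvScan l (i + 1) true i
      else
        pvScan l (i + 1) false start
  else
    []
termination_by l.length - i

def find_inline_math_spans_alt (line : String) : List (Int × Int) :=
  pvScan line.toList 0 false 0

-- ===== PRECONDITION & SPEC =====
def Spec_find_inline_math_spans (line : String) (out : List (Int × Int)) : Prop := out = find_inline_math_spans_alt line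
instance (line : String) (out : List (Int × Int)) : Decidable (Spec_find_inline_math_spans line out) := by unfold Spec_find_inline_math_spans; infer_instance

-- ===== CLAIM (what is proved, stated in full; the proofs are below) =====
def Claim_equal_find_inline_math_spans : Prop := ∀ (line : String), Dom_find_inline_math_spans line → Spec_find_inline_math_spans line (find_inline_math_spans line)

-- ===== LEMMAS AND PROOFS =====

-- If the inner search finds the closing '$' at j, the in-math scan emits (start, j+1) and
-- resumes out of math at j+1
theorem pvScan_inner_some (l : List Char) (p : Nat) (s : Nat) (j : Nat)
    (h : pvInner l p = some j) :
    pvScan l p true s = ((s : Int), (j : Int) + 1) :: pvScan l (j + 1) false s := by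
  fun_induction pvInner l p with
  | case1 p hp h1 ih =>
    rw [pvScan]; rw [dif_pos hp, if_pos rfl, if_pos h1]; exact ih h
  | case2 p hp h1 h2 h3 ih =>
    rw [pvScan]; rw [dif_pos hp, if_pos rfl, if_neg h1, if_pos h2, if_pos h3]; exact ih h
  | case3 p hp h1 h2 h3 =>
    simp only [Option.some.injEq] at h; subst h
    rw [pvScan]; rw [dif_pos hp, if_pos rfl, if_neg h1, if_pos h2, if_neg h3]
  | case4 p hp h1 h2 ih =>
    rw [pvScan]; rw [dif_pos hp, if_pos rfl, if_neg h1, if_neg h2]; exact ih h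
  | case5 p hp => simp at h

-- if it fails, the in-math scan emits nothing
theorem pvScan_inner_none (l : List Char) (p : Nat) (s : Nat)
    (h : pvInner l p = none) :
    pvScan l p true s = [] := by
  fun_induction pvInner l p with
  | case1 p hp h1 ih =>
    rw [pvScan]; rw [dif_pos hp, if_pos rfl, if_pos h1]; exact ih h
  | case2 p hp h1 h2 h3 ih =>
    rw [pvScan]; rw [dif_pos hp, if_pos rfl, if_neg h1, if_pos h2, if_pos h3]; exact ih h
  | case3 p hp h1 h2 h3 => simp at h
  | case4 p hp h1 h2 ih =>
    rw [pvScan]; rw [dif_pos hp, if_pos rfl, if_neg h1, if_neg h2]; exact ih h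
  | case5 p hp => rw [pvScan]; rw [dif_neg hp]

-- The crux: if the inner search from p finds no closing '$', then A's outer rescan from p
-- yields no spans at all (Z1), and likewise from a '$' whose inner search fails (Z2);
-- proved jointly by induction on a bound m of l.length - p.
theorem pvOuter_noclose (l : List Char) (m : Nat) : ∀ (p : Nat), l.length - p ≤ m →
    ((pvInner l p = none → pvOuter l p = []) ∧
     (l[p]?.getD ' ' = '$' → pvInner l (p + 1) = none → pvOuter l p = [])) := by
  induction m with
  | zero =>
    intro p hp
    have hpn : ¬ p < l.length := by omega
    exact ⟨fun _ => by rw [pvOuter]; rw [dif_neg hpn],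
           fun _ _ => by rw [pvOuter]; rw [dif_neg hpn]⟩
  | succ m ih =>
    intro p hp
    by_cases hpn : p < l.length
    · constructor
      · -- Z1
        intro hnone
        by_cases h1 : l[p]?.getD ' ' = '$'
        · -- a '$' at p: inner p must have skipped a '$$' (a lone '$' would close at p)
          rw [pvInner] at hnone
          have hne : ¬ (l[p]?.getD ' ' = '\\' ∧ p + 1 < l.length) := by
            intro hc; rw [h1] at hc; exact absurd hc.1 (by decide)
          rw [dif_pos hpn, if_neg hne, if_pos h1] at hnone
          by_cases h2 : p + 1 < l.length ∧ l[p + 1]?.getD ' ' = '$'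
          · rw [if_pos h2] at hnone
            rw [pvOuter]; rw [dif_pos hpn, if_pos h1, if_pos h2]
            exact (ih (p + 2) (by omega)).1 hnone
          · rw [if_neg h2] at hnone; exact absurd hnone (by simp)
        · -- not a '$' at p: outer steps to p+1
          rw [pvOuter]; rw [dif_pos hpn, if_neg h1]
          rw [pvInner] at hnone
          by_cases hesc : l[p]?.getD ' ' = '\\' ∧ p + 1 < l.length
          · rw [dif_pos hpn, if_pos hesc] at hnone
            -- inner skipped the escape pair; outer visits p+1 first
            by_cases h2 : l[p + 1]?.getD ' ' = '$'
            · exact (ih (p + 1) (by omega)).2 h2 hnone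
            · have hp1 : p + 1 < l.length := hesc.2
              rw [pvOuter]; rw [dif_pos hp1, if_neg h2]
              exact (ih (p + 2) (by omega)).1 hnone
          · rw [dif_pos hpn, if_neg hesc, if_neg h1] at hnone
            exact (ih (p + 1) (by omega)).1 hnone
      · -- Z2
        intro h1 hnone
        rw [pvOuter]; rw [dif_pos hpn, if_pos h1]
        by_cases h2 : p + 1 < l.length ∧ l[p + 1]?.getD ' ' = '$'
        · rw [if_pos h2]
          -- inner (p+1) starts at a '$'; none forces it to skip a '$$'
          rw [pvInner] at hnone
          have hne : ¬ (l[p + 1]?.getD ' ' = '\\' ∧ p + 1 + 1 < l.length) := by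
            intro hc; rw [h2.2] at hc; exact absurd hc.1 (by decide)
          rw [dif_pos h2.1, if_neg hne, if_pos h2.2] at hnone
          by_cases h3 : p + 1 + 1 < l.length ∧ l[p + 1 + 1]?.getD ' ' = '$'
          · rw [if_pos h3] at hnone
            exact (ih (p + 2) (by omega)).2 h3.2 hnone
          · rw [if_neg h3] at hnone; exact absurd hnone (by simp)
        · rw [if_neg h2]
          split
          · next j hj => rw [hnone] at hj; exact absurd hj (by simp)
          · next => exact (ih (p + 1) (by omega)).1 hnone
    · exact ⟨fun _ => by rw [pvOuter]; rw [dif_neg hpn],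
             fun _ _ => by rw [pvOuter]; rw [dif_neg hpn]⟩

-- Main equivalence: A's outer loop equals B's out-of-math scan, for any stale start value
theorem pvOuter_eq_pvScan (l : List Char) (i : Nat) : ∀ (s : Nat),
    pvOuter l i = pvScan l i false s := by
  fun_induction pvOuter l i with
  | case1 i hi h1 h2 ih =>
    intro s
    rw [pvScan]; rw [dif_pos hi, if_neg (by simp), if_pos h1, if_pos h2]
    exact ih s
  | case2 i hi h1 h2 j hj ih =>
    intro s
    rw [pvScan]; rw [dif_pos hi, if_neg (by simp), if_pos h1, if_neg h2]
    rw [pvScan_inner_some l (i + 1) i j hj]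
    exact congrArg _ (ih i)
  | case3 i hi h1 h2 hj ih =>
    intro s
    rw [pvScan]; rw [dif_pos hi, if_neg (by simp), if_pos h1, if_neg h2]
    rw [pvScan_inner_none l (i + 1) i hj]
    exact (pvOuter_noclose l (l.length - (i + 1)) (i + 1) le_rfl).1 hj
  | case4 i hi h1 ih =>
    intro s
    rw [pvScan]; rw [dif_pos hi, if_neg (by simp), if_neg h1]
    exact ih s
  | case5 i hi =>
    intro s
    rw [pvScan]; rw [dif_neg hi]

-- ===== VERDICT (by name: the statement is the Claim_ definition above) =====
theorem find_inline_math_spans_spec : Claim_equal_find_inline_math_spans := by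
  intro line _
  unfold Spec_find_inline_math_spans find_inline_math_spans find_inline_math_spans_alt
  exact pvOuter_eq_pvScan _ 0 0
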